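-- pv_equiv track=rewrite | github.com/jiwwnn/algorithm | 프로그래머스/unrated/181935. 홀짝에 따라 다른 값 반환하기/홀짝에 따라 다른 값 반환하기.py | solution
-- ===== SOURCE A (Python) =====
-- def solution(n):
--     answer = 0
--     for i in range(n%2, n+1, 2):
--         if n%2 == 0:
--             answer += i**2
--         else:
--             answer += i
--     return answer
-- ===== SOURCE B (Python) =====
-- def solution(n):
--     # Closed-form: odd n -> sum of odds 1..n = ((n+1)//2)**2;
--     # even n -> sum of even squares 0..n = 2*m*(m+1)*(2m+1)//3 with m = n//2.
--     if n < 0: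
--         return 0
--     if n % 2:
--         m = (n + 1) // 2
--         return m * m
--     m = n // 2
--     return 2 * m * (m + 1) * (2 * m + 1) // 3
-- ===== Notes on version B (the rewrite author's own statement) =====
-- stated objective: faster
-- what changed: Replaced the parity-dependent summation loop over range(n%2, n+1, 2) by O(1) closed-form formulas: ((n+1)//2)**2 for odd n, 2*m*(m+1)*(2*m+1)//3 with m=n//2 for even n, and 0 for negative n.
import Mathlib
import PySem

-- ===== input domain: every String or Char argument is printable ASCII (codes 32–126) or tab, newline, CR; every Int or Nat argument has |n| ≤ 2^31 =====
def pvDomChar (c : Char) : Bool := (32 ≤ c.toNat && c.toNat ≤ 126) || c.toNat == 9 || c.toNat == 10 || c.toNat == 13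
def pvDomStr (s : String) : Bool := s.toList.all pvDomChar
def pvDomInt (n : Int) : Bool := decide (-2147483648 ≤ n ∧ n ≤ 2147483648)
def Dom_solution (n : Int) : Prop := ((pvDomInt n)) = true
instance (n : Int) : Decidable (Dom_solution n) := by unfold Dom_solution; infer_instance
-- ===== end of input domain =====

-- B replaces A's O(n) parity loop by O(1) closed-form formulas (sum of odds / sum of even squares).

-- ===== PORT A =====
def solution (n : Int) : Int :=
  (PySem.List.pyRange (PySem.Int.mod n 2) (n + 1) 2).foldl
    (fun answer i => if PySem.Int.mod n 2 == 0 then answer + i ^ 2 else answer + i) 0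

-- ===== PORT B =====
def solution_alt (n : Int) : Int :=
  if n < 0 then 0
  else if PySem.Int.mod n 2 ≠ 0 then
    let m := PySem.Int.floordiv (n + 1) 2
    m * m
  else
    let m := PySem.Int.floordiv n 2
    PySem.Int.floordiv (2 * m * (m + 1) * (2 * m + 1)) 3

-- ===== PRECONDITION & SPEC =====
def Spec_solution (n : Int) (out : Int) : Prop := out = solution_alt n
instance (n : Int) (out : Int) : Decidable (Spec_solution n out) := by unfold Spec_solution; infer_instance

-- ===== CLAIM (what is proved, stated in full; the proofs are below) =====
def Claim_equal_solution : Prop := ∀ (n : Int), Dom_solution n → Spec_solution n (solution n)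

-- ===== LEMMAS AND PROOFS =====

theorem foldl_range_succ (g : Nat → Int) (m : Nat) :
    (List.range (m + 1)).foldl (fun (a : Int) (k : Nat) => a + g k) 0
      = (List.range m).foldl (fun (a : Int) (k : Nat) => a + g k) 0 + g m := by
  rw [List.range_succ, List.foldl_append]
  rfl

theorem sumSq_closed (m : Nat) :
    3 * (List.range (m + 1)).foldl (fun (a : Int) (k : Nat) => a + (0 + 2 * (k : Int)) ^ 2) 0
      = 2 * m * (m + 1) * (2 * m + 1) := by
  induction m with
  | zero => decide
  | succ m ih =>
      rw [foldl_range_succ (fun k => (0 + 2 * (k : Int)) ^ 2)]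
      rw [mul_add, ih]
      push_cast
      ring

theorem sumOdd_closed (m : Nat) :
    (List.range (m + 1)).foldl (fun (a : Int) (k : Nat) => a + (1 + 2 * (k : Int))) 0
      = ((m : Int) + 1) * ((m : Int) + 1) := by
  induction m with
  | zero => decide
  | succ m ih =>
      rw [foldl_range_succ (fun k => 1 + 2 * (k : Int)), ih]
      push_cast
      ring

theorem mod_two_cast (m : Nat) : PySem.Int.mod (2 * (m : Int)) 2 = 0 := by
  rw [PySem.Int.mod_eq_emod_of_pos (by omega)]
  omega

theorem mod_two_cast_odd (m : Nat) : PySem.Int.mod (2 * (m : Int) + 1) 2 = 1 := by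
  rw [PySem.Int.mod_eq_emod_of_pos (by omega)]
  omega

theorem solution_even (m : Nat) :
    solution (2 * m)
      = (List.range (m + 1)).foldl (fun (a : Int) (k : Nat) => a + (0 + 2 * (k : Int)) ^ 2) 0 := by
  unfold solution
  rw [PySem.List.pyRange_of_pos _ _ (by omega), mod_two_cast]
  have hc : (if (0 : Int) < 2 * m + 1 then ((2 * (m : Int) + 1 - 0 + 2 - 1) / 2).toNat else 0)
      = m + 1 := by
    rw [if_pos (by omega)]
    omega
  rw [hc, List.foldl_map]
  simp only [beq_self_eq_true, if_true]

theorem solution_odd (m : Nat) :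
    solution (2 * m + 1)
      = (List.range (m + 1)).foldl (fun (a : Int) (k : Nat) => a + (1 + 2 * (k : Int))) 0 := by
  unfold solution
  rw [PySem.List.pyRange_of_pos _ _ (by omega), mod_two_cast_odd]
  have hc : (if (1 : Int) < 2 * m + 1 + 1 then ((2 * (m : Int) + 1 + 1 - 1 + 2 - 1) / 2).toNat else 0)
      = m + 1 := by
    rw [if_pos (by omega)]
    omega
  rw [hc, List.foldl_map]
  simp

theorem solution_neg (n : Int) (h : n < 0) : solution n = 0 := by
  unfold solution
  have hr : ¬ PySem.Int.mod n 2 < n + 1 := by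
    have := PySem.Int.mod_nonneg n (b := 2) (by omega)
    omega
  rw [PySem.List.pyRange_of_pos _ _ (by omega), if_neg hr]
  rfl

-- ===== VERDICT (by name: the statement is the Claim_ definition above) =====
theorem solution_spec : Claim_equal_solution := by
  unfold Claim_equal_solution
  intro n _
  unfold Spec_solution solution_alt
  by_cases hneg : n < 0
  · rw [if_pos hneg, solution_neg n hneg]
  · rw [if_neg hneg]
    rcases Int.even_or_odd n with ⟨m, hm⟩ | ⟨m, hm⟩
    · -- even: n = 2*m, m ≥ 0
      obtain ⟨m', rfl⟩ : ∃ m' : Nat, m = (m' : Int) := ⟨m.toNat, by omega⟩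
      have hn : n = 2 * (m' : Int) := by omega
      subst hn
      rw [if_neg (by simp)]
      have hfd : PySem.Int.floordiv (2 * (m' : Int)) 2 = m' := by
        rw [PySem.Int.floordiv_eq_ediv_of_pos (by omega)]
        omega
      rw [hfd, solution_even m']
      rw [PySem.Int.floordiv_eq_ediv_of_pos (by omega)]
      rw [← sumSq_closed m', Int.mul_ediv_cancel_left _ (by omega)]
    · -- odd: n = 2*m+1, m ≥ 0
      obtain ⟨m', rfl⟩ : ∃ m' : Nat, m = (m' : Int) := ⟨m.toNat, by omega⟩
      have hn : n = 2 * (m' : Int) + 1 := by omega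
      subst hn
      rw [if_pos (by simp)]
      have hfd : PySem.Int.floordiv (2 * (m' : Int) + 1 + 1) 2 = (m' : Int) + 1 := by
        rw [PySem.Int.floordiv_eq_ediv_of_pos (by omega)]
        omega
      rw [hfd, solution_odd m', sumOdd_closed m']
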